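-- pv_equiv track=rewrite | github.com/stenknutsen/HomeGrownPOSTagger | PhaseFourTagging.py | be_so_UNK_that_Tagger
-- ===== SOURCE A (Python) =====
-- def be_so_UNK_that_Tagger(sent):
--     sentToReturn = []
--     skip = 0
--
--     for i in range(len(sent)):
--
--         if skip>0:
--             skip = skip -1
--             continue
--
--
--         if (i)<0 | (i+3)>=len(sent):
--             sentToReturn += [sent[i]]
--             continue
--
--         leftContext = sent[i]
--         leftTarget = sent[i+1]
--         rightTarget = sent[i+2]
--         rightContext = sent[i+3]
--
--
--         if ((leftContext[0].lower()=="are")|(leftContext[0].lower()=="is")|(leftContext[0].lower()=="was")|(leftContext[0].lower()=="were"))&\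
--                 (leftTarget[0].lower()=="so")&(rightTarget[1]=="UNK")&(rightContext[0]=="that"):
--
--             sentToReturn += [leftContext]
--             sentToReturn += [(leftTarget[0], "RB")]
--             sentToReturn += [(rightTarget[0],"J")]
--             sentToReturn += [(rightContext[0],"IN")]
--             skip = 3
--
--         else:
--             sentToReturn += [leftContext]
--
--     return sentToReturn
-- ===== SOURCE B (Python) =====
-- def _match(sent, i):
--     w = sent[i][0].lower()
--     return w in ("are", "is", "was", "were") and sent[i + 1][0].lower() == "so" \
--         and sent[i + 2][1] == "UNK" and sent[i + 3][0] == "that"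
--
--
-- def _retag(tok, j, rb, jt, inn):
--     if j in rb:
--         return (tok[0], "RB")
--     if j in jt:
--         return (tok[0], "J")
--     if j in inn:
--         return (tok[0], "IN")
--     return tok
--
--
-- def be_so_UNK_that_Tagger(sent):
--     # Stage 1: find every position where the 4-token pattern matches.
--     # Matches can never overlap (a match forces sent[i+1] to be "so" and
--     # sent[i+3] to be "that", neither of which can start another match),
--     # so the raw scan finds exactly the matches A's greedy skip finds.
--     starts = [i for i in range(len(sent) - 3) if _match(sent, i)]
--     # Stage 2: mark the retagged positions and rebuild token by token.
--     rb = {i + 1 for i in starts}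
--     jt = {i + 2 for i in starts}
--     inn = {i + 3 for i in starts}
--     return [_retag(tok, j, rb, jt, inn) for j, tok in enumerate(sent)]
-- ===== Notes on version B (the rewrite author's own statement) =====
-- stated objective: alternative
-- what changed: Replaces A's single stateful pass (skip counter eating the three tokens after a match) by a stateless two-stage algorithm: first collect all pattern start positions (provably non-overlapping), build the three sets of positions to retag, then rebuild the sentence by an independent per-index lookup.
import Mathlib
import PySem

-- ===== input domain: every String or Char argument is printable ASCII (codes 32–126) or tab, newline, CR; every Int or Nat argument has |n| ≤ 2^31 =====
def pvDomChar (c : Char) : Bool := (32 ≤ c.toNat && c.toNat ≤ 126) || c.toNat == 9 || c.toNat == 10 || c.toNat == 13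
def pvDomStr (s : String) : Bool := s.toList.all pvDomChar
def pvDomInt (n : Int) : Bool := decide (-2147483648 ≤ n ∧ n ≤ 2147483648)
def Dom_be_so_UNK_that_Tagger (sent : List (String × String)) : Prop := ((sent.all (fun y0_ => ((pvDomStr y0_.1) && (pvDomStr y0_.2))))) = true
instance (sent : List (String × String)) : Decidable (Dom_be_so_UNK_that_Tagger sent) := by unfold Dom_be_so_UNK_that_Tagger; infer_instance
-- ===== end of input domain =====

-- B replaces A's stateful skip-counter pass by a stateless two-stage algorithm
-- (collect the non-overlapping match positions, then retag each index independently).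

-- ===== PORT A =====
-- the pattern test, evaluated eagerly with `|`/`&` as in the Python
def pvPatternHit (lc lt rt rc : String × String) : Bool :=
  (((PySem.Str.lower lc.1 == "are") || (PySem.Str.lower lc.1 == "is") ||
    (PySem.Str.lower lc.1 == "was") || (PySem.Str.lower lc.1 == "were")) &&
   (PySem.Str.lower lt.1 == "so") && (rt.2 == "UNK") && (rc.1 == "that"))

-- one iteration of A's for-loop body; state = (skip, sentToReturn)
def pvAstep (sent : List (String × String)) (st : Nat × List (String × String)) (i : Nat) :
    Nat × List (String × String) :=
  let skip := st.1
  let acc := st.2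
  if skip > 0 then (skip - 1, acc)
  -- A's guard `(i)<0 | (i+3)>=len(sent)` is the chained comparison i < (0|(i+3)) >= len,
  -- i.e. (i < i+3) and (i+3 ≥ len) = i+3 ≥ len
  else if i + 3 ≥ sent.length then (skip, acc ++ [sent.getD i ("", "")])
  else
    let lc := sent.getD i ("", "")
    let lt := sent.getD (i+1) ("", "")
    let rt := sent.getD (i+2) ("", "")
    let rc := sent.getD (i+3) ("", "")
    if pvPatternHit lc lt rt rc then
      (3, acc ++ [lc, (lt.1, "RB"), (rt.1, "J"), (rc.1, "IN")])
    else (skip, acc ++ [lc])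

def be_so_UNK_that_Tagger (sent : List (String × String)) : List (String × String) :=
  ((List.range sent.length).foldl (pvAstep sent) (0, [])).2

-- ===== PORT B =====
-- Source B's _match(sent, i): indices i..i+3 are valid whenever Python calls it
def pvMatch (sent : List (String × String)) (i : Int) : Bool :=
  let w := PySem.Str.lower (PySem.List.pyGetD sent i ("", "")).1
  (["are", "is", "was", "were"].contains w) &&
  (PySem.Str.lower (PySem.List.pyGetD sent (i+1) ("", "")).1 == "so") &&
  ((PySem.List.pyGetD sent (i+2) ("", "")).2 == "UNK") &&
  ((PySem.List.pyGetD sent (i+3) ("", "")).1 == "that")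

-- Source B's _retag
def pvRetag (tok : String × String) (j : Int) (rb jt inn : PySem.Set Int) : String × String :=
  if PySem.Set.contains rb j then (tok.1, "RB")
  else if PySem.Set.contains jt j then (tok.1, "J")
  else if PySem.Set.contains inn j then (tok.1, "IN")
  else tok

def be_so_UNK_that_Tagger_alt (sent : List (String × String)) : List (String × String) :=
  let starts := (PySem.List.pyRange 0 ((sent.length : Int) - 3) 1).filter (pvMatch sent)
  let rb := PySem.Set.ofList (starts.map (· + 1))
  let jt := PySem.Set.ofList (starts.map (· + 2))
  let inn := PySem.Set.ofList (starts.map (· + 3))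
  (PySem.List.enumerate sent 0).map (fun p => pvRetag p.2 p.1 rb jt inn)

-- ===== PRECONDITION & SPEC =====
def Spec_be_so_UNK_that_Tagger (sent : List (String × String)) (out : List (String × String)) : Prop := out = be_so_UNK_that_Tagger_alt sent
instance (sent : List (String × String)) (out : List (String × String)) : Decidable (Spec_be_so_UNK_that_Tagger sent out) := by unfold Spec_be_so_UNK_that_Tagger; infer_instance

-- ===== CLAIM (what is proved, stated in full; the proofs are below) =====
def Claim_equal_be_so_UNK_that_Tagger : Prop := ∀ (sent : List (String × String)), Dom_be_so_UNK_that_Tagger sent → Spec_be_so_UNK_that_Tagger sent (be_so_UNK_that_Tagger sent)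

-- ===== LEMMAS AND PROOFS =====

-- proof-only intermediate: A's greedy pass written as structural recursion on the index
def pvBgo (sent : List (String × String)) (i : Nat) : List (String × String) :=
  if h : i < sent.length then
    if i + 3 ≥ sent.length then sent.getD i ("", "") :: pvBgo sent (i + 1)
    else
      let lc := sent.getD i ("", "")
      let lt := sent.getD (i+1) ("", "")
      let rt := sent.getD (i+2) ("", "")
      let rc := sent.getD (i+3) ("", "")
      if pvPatternHit lc lt rt rc then
        lc :: (lt.1, "RB") :: (rt.1, "J") :: (rc.1, "IN") :: pvBgo sent (i + 4)
      else sent.getD i ("", "") :: pvBgo sent (i + 1)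
  else []
termination_by sent.length - i

-- the raw hit test at a Nat position
def pvHit (sent : List (String × String)) (i : Nat) : Bool :=
  pvPatternHit (sent.getD i ("", "")) (sent.getD (i+1) ("", ""))
    (sent.getD (i+2) ("", "")) (sent.getD (i+3) ("", ""))

-- main invariant for A: folding A's step over i, i+1, …, n-1 with skip = 0 yields acc ++ pvBgo
theorem pvA_main (sent : List (String × String)) :
    ∀ k i acc, i + k = sent.length →
      ((List.range' i k).foldl (pvAstep sent) (0, acc)).2 = acc ++ pvBgo sent i := by
  intro k
  induction k using Nat.strong_induction_on with
  | _ k ih =>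
    intro i acc hk
    match k with
    | 0 =>
      simp only [List.range', List.foldl]
      rw [pvBgo]
      simp [show ¬ i < sent.length by omega]
    | Nat.succ k' =>
      rw [List.range'_succ, List.foldl_cons]
      rw [pvBgo]
      have hi : i < sent.length := by omega
      simp only [hi, dif_pos]
      by_cases hg : i + 3 ≥ sent.length
      · rw [show pvAstep sent (0, acc) i = (0, acc ++ [sent.getD i ("", "")]) from by
          simp [pvAstep, hg]]
        rw [ih k' (by omega) (i+1) _ (by omega)]
        simp [hg]
      · by_cases hp : pvPatternHit (sent[i]?.getD ("", "")) (sent[i+1]?.getD ("", ""))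
            (sent[i+2]?.getD ("", "")) (sent[i+3]?.getD ("", ""))
        · rw [show pvAstep sent (0, acc) i
              = (3, acc ++ [sent.getD i ("", ""), ((sent.getD (i+1) ("", "")).1, "RB"),
                  ((sent.getD (i+2) ("", "")).1, "J"), ((sent.getD (i+3) ("", "")).1, "IN")]) from by
            simp [pvAstep, hg, hp]]
          obtain ⟨k'', rfl⟩ : ∃ k'', k' = k'' + 3 := ⟨k' - 3, by omega⟩
          rw [List.range'_succ, List.foldl_cons, List.range'_succ, List.foldl_cons,
              List.range'_succ, List.foldl_cons]
          rw [show ∀ a, pvAstep sent (3, a) (i+1) = (2, a) from fun a => by simp [pvAstep]]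
          rw [show ∀ a, pvAstep sent (2, a) (i+1+1) = (1, a) from fun a => by simp [pvAstep]]
          rw [show ∀ a, pvAstep sent (1, a) (i+1+1+1) = (0, a) from fun a => by simp [pvAstep]]
          have h4 : i + 1 + 1 + 1 + 1 = i + 4 := by omega
          rw [h4, ih k'' (by omega) (i+4) _ (by omega)]
          simp [show ¬ sent.length ≤ i + 3 by omega, hp]
        · rw [show pvAstep sent (0, acc) i = (0, acc ++ [sent.getD i ("", "")]) from by
            simp [pvAstep, hg, hp]]
          rw [ih k' (by omega) (i+1) _ (by omega)]
          simp [show ¬ sent.length ≤ i + 3 by omega, hp]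

-- pvMatch at a Nat index is the raw hit test
theorem pvMatch_natCast (sent : List (String × String)) (i : Nat) :
    pvMatch sent (i : Int) = pvHit sent i := by
  simp only [pvMatch, pvHit, pvPatternHit]
  rw [show ((i : Int) + 1) = ((i+1 : Nat) : Int) by push_cast; ring,
      show ((i : Int) + 2) = ((i+2 : Nat) : Int) by push_cast; ring,
      show ((i : Int) + 3) = ((i+3 : Nat) : Int) by push_cast; ring]
  simp only [PySem.List.pyGetD_natCast]
  simp only [List.contains_cons, List.contains_nil, Bool.or_false, Bool.or_assoc]

-- matches never overlap
theorem pvHit_no_overlap (sent : List (String × String)) (i : Nat) (h : pvHit sent i = true) :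
    pvHit sent (i+1) = false ∧ pvHit sent (i+2) = false ∧ pvHit sent (i+3) = false := by
  simp only [pvHit, pvPatternHit, Bool.and_eq_true, beq_iff_eq, Bool.or_eq_true] at h
  obtain ⟨⟨⟨_, hso⟩, _⟩, hthat⟩ := h
  have hlow : PySem.Str.lower (sent.getD (i+3) ("", "")).1 = "that" := by
    rw [hthat]; decide
  refine ⟨?_, ?_, ?_⟩
  · simp only [pvHit, pvPatternHit, hso]
    simp
  · simp only [pvHit, pvPatternHit, show i+2+1 = i+3 by omega, hlow]
    simp
  · simp only [pvHit, pvPatternHit, hlow]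
    simp

-- the list of match positions B computes, as a named term for the proofs
def pvStarts (sent : List (String × String)) : List Int :=
  (PySem.List.pyRange 0 ((sent.length : Int) - 3) 1).filter (pvMatch sent)

theorem pv_mem_starts (sent : List (String × String)) (x : Int) :
    x ∈ pvStarts sent ↔ ∃ t : Nat, t + 3 < sent.length ∧ pvHit sent t = true ∧ x = (t : Int) := by
  unfold pvStarts
  rw [List.mem_filter, PySem.List.mem_pyRange_one]
  constructor
  · rintro ⟨⟨h0, hlt⟩, hm⟩
    lift x to ℕ using h0 with t
    exact ⟨t, by omega, by rwa [pvMatch_natCast] at hm, rfl⟩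
  · rintro ⟨t, hlen, hhit, rfl⟩
    exact ⟨⟨by positivity, by omega⟩, by rwa [pvMatch_natCast]⟩

-- membership in one of the three shifted position sets
theorem pv_contains_off (sent : List (String × String)) (c : Int) (j : Nat) :
    PySem.Set.contains (PySem.Set.ofList ((pvStarts sent).map (· + c))) (j : Int) = true ↔
      ∃ t : Nat, t + 3 < sent.length ∧ pvHit sent t = true ∧ (j : Int) = (t : Int) + c := by
  rw [PySem.Set.contains_iff, PySem.Set.mem_ofList, List.mem_map]
  constructor
  · rintro ⟨x, hx, hxe⟩
    obtain ⟨t, h1, h2, rfl⟩ := (pv_mem_starts sent x).1 hx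
    exact ⟨t, h1, h2, by omega⟩
  · rintro ⟨t, h1, h2, h3⟩
    exact ⟨(t : Int), (pv_mem_starts sent _).2 ⟨t, h1, h2, rfl⟩, h3.symm⟩

-- a position no match covers as offset c ∈ {1,2,3} is not in the shifted set
theorem pv_contains_off_false (sent : List (String × String)) (c : Int) (j : Nat)
    (hcl : ∀ t : Nat, t + 3 < sent.length → pvHit sent t = true → ¬ ((j : Int) = (t : Int) + c)) :
    PySem.Set.contains (PySem.Set.ofList ((pvStarts sent).map (· + c))) (j : Int) = false := by
  rw [Bool.eq_false_iff]
  intro h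
  obtain ⟨t, h1, h2, h3⟩ := (pv_contains_off sent c j).1 h
  exact hcl t h1 h2 h3

-- main invariant for B: from a "clean" index i (no match straddles i), the greedy
-- recursion equals the per-index retagging of the remaining positions
theorem pvB_main (sent : List (String × String)) :
    ∀ k i, i + k = sent.length →
      (∀ t : Nat, t + 3 < sent.length → pvHit sent t = true → t + 3 < i ∨ i ≤ t) →
      pvBgo sent i = (List.range' i k).map (fun j => pvRetag (sent.getD j ("", "")) (j : Int)
        (PySem.Set.ofList ((pvStarts sent).map (· + 1)))
        (PySem.Set.ofList ((pvStarts sent).map (· + 2)))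
        (PySem.Set.ofList ((pvStarts sent).map (· + 3)))) := by
  intro k
  induction k using Nat.strong_induction_on with
  | _ k ih =>
    intro i hk hcl
    match k with
    | 0 =>
      rw [pvBgo]
      simp [show ¬ i < sent.length by omega]
    | Nat.succ k' =>
      have hi : i < sent.length := by omega
      rw [pvBgo]
      simp only [hi, dif_pos]
      have hclean_i : pvRetag (sent.getD i ("", "")) (i : Int)
          (PySem.Set.ofList ((pvStarts sent).map (· + 1)))
          (PySem.Set.ofList ((pvStarts sent).map (· + 2)))
          (PySem.Set.ofList ((pvStarts sent).map (· + 3))) = sent.getD i ("", "") := by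
        unfold pvRetag
        rw [pv_contains_off_false sent 1 i
              (fun t h1 h2 he => by rcases hcl t h1 h2 with h | h <;> omega),
            pv_contains_off_false sent 2 i
              (fun t h1 h2 he => by rcases hcl t h1 h2 with h | h <;> omega),
            pv_contains_off_false sent 3 i
              (fun t h1 h2 he => by rcases hcl t h1 h2 with h | h <;> omega)]
        simp
      by_cases hg : i + 3 ≥ sent.length
      · rw [if_pos hg, List.range'_succ, List.map_cons, hclean_i]
        rw [ih k' (by omega) (i+1) (by omega)
             (fun t h1 h2 => by rcases hcl t h1 h2 with h | h <;> omega)]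
      · rw [if_neg hg]
        have hn : i + 3 < sent.length := by omega
        by_cases hp : pvHit sent i
        · have hov := pvHit_no_overlap sent i hp
          obtain ⟨k'', rfl⟩ : ∃ k'', k' = k'' + 3 := ⟨k' - 3, by omega⟩
          simp only [pvHit] at hp
          rw [if_pos hp]
          rw [List.range'_succ, List.range'_succ, List.range'_succ, List.range'_succ,
              List.map_cons, List.map_cons, List.map_cons, List.map_cons, hclean_i]
          have hrb : pvRetag (sent.getD (i+1) ("", "")) ((i+1 : Nat) : Int)
              (PySem.Set.ofList ((pvStarts sent).map (· + 1)))
              (PySem.Set.ofList ((pvStarts sent).map (· + 2)))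
              (PySem.Set.ofList ((pvStarts sent).map (· + 3)))
              = ((sent.getD (i+1) ("", "")).1, "RB") := by
            unfold pvRetag
            rw [if_pos (by
              rw [pv_contains_off sent 1 (i+1)]
              exact ⟨i, hn, by simpa [pvHit] using hp, by push_cast; ring⟩)]
          have hjt : pvRetag (sent.getD (i+2) ("", "")) ((i+2 : Nat) : Int)
              (PySem.Set.ofList ((pvStarts sent).map (· + 1)))
              (PySem.Set.ofList ((pvStarts sent).map (· + 2)))
              (PySem.Set.ofList ((pvStarts sent).map (· + 3)))
              = ((sent.getD (i+2) ("", "")).1, "J") := by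
            unfold pvRetag
            rw [pv_contains_off_false sent 1 (i+2)
                  (fun t h1 h2 he => by
                    have ht : t = i + 1 := by omega
                    subst ht; rw [hov.1] at h2; exact Bool.false_ne_true h2)]
            rw [if_neg (by simp), if_pos (by
              rw [pv_contains_off sent 2 (i+2)]
              exact ⟨i, hn, by simpa [pvHit] using hp, by push_cast; ring⟩)]
          have hin : pvRetag (sent.getD (i+3) ("", "")) ((i+3 : Nat) : Int)
              (PySem.Set.ofList ((pvStarts sent).map (· + 1)))
              (PySem.Set.ofList ((pvStarts sent).map (· + 2)))
              (PySem.Set.ofList ((pvStarts sent).map (· + 3)))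
              = ((sent.getD (i+3) ("", "")).1, "IN") := by
            unfold pvRetag
            rw [pv_contains_off_false sent 1 (i+3)
                  (fun t h1 h2 he => by
                    have ht : t = i + 2 := by omega
                    subst ht; rw [hov.2.1] at h2; exact Bool.false_ne_true h2),
                pv_contains_off_false sent 2 (i+3)
                  (fun t h1 h2 he => by
                    have ht : t = i + 1 := by omega
                    subst ht; rw [hov.1] at h2; exact Bool.false_ne_true h2)]
            rw [if_neg (by simp), if_neg (by simp), if_pos (by
              rw [pv_contains_off sent 3 (i+3)]
              exact ⟨i, hn, by simpa [pvHit] using hp, by push_cast; ring⟩)]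
          rw [hrb, hjt, hin, show ((i+3:Nat)+1) = i+4 by omega]
          rw [ih k'' (by omega) (i+4) (by omega)
               (fun t h1 h2 => by
                 rcases hcl t h1 h2 with h | h
                 · omega
                 · rcases (show t = i ∨ t = i+1 ∨ t = i+2 ∨ t = i+3 ∨ i+4 ≤ t by omega)
                     with rfl | rfl | rfl | rfl | h4
                   · omega
                   · rw [hov.1] at h2; exact absurd h2 (by simp)
                   · rw [hov.2.1] at h2; exact absurd h2 (by simp)
                   · rw [hov.2.2] at h2; exact absurd h2 (by simp)
                   · omega)]
        · simp only [pvHit] at hp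
          rw [if_neg hp, List.range'_succ, List.map_cons, hclean_i]
          rw [ih k' (by omega) (i+1) (by omega)
               (fun t h1 h2 => by
                 rcases hcl t h1 h2 with h | h
                 · omega
                 · rcases (show t = i ∨ i + 1 ≤ t by omega) with rfl | h4
                   · exact absurd h2 (by simpa [pvHit] using hp)
                   · omega)]

-- ===== VERDICT (by name: the statement is the Claim_ definition above) =====
theorem be_so_UNK_that_Tagger_spec : Claim_equal_be_so_UNK_that_Tagger := by
  intro sent _
  unfold Spec_be_so_UNK_that_Tagger be_so_UNK_that_Tagger
  rw [List.range_eq_range', pvA_main sent sent.length 0 [] (by omega), List.nil_append]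
  rw [pvB_main sent sent.length 0 (by omega) (fun t _ _ => Or.inr (Nat.zero_le t))]
  unfold be_so_UNK_that_Tagger_alt
  rw [show PySem.List.enumerate sent 0 = PySem.List.enumerate sent from rfl]
  rw [PySem.List.enumerate_eq_map_pyRange sent ("", "")]
  rw [show PySem.List.len sent = ((sent.length : Int)) from rfl]
  rw [PySem.List.pyRange_zero_natCast, List.map_map, List.map_map]
  rw [← List.range_eq_range' ]
  apply List.map_congr_left
  intro t _
  simp only [Function.comp_apply, PySem.List.pyGetD_natCast]
  rfl
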